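-- pv_equiv track=rewrite | github.com/seancho514/20211311-Algorithm-Assignment-2025 | sort.py | buildmaxheap
-- ===== SOURCE A (Python) =====
-- def maxheapify(A, i, heapsize):
--     L = i * 2 + 1
--     R = i * 2 + 2
--     largest = i
--     if L < heapsize and A[L] > A[i]:
--         largest = L
--     if R < heapsize and A[R] > A[largest]:
--         largest = R
--     if largest != i:
--         temp = A[i]
--         A[i] = A[largest]
--         A[largest] = temp
--         A = maxheapify(A, largest, heapsize)
--     return A
--
-- def buildmaxheap(A):
--     n = len(A) - 1
--     i = int(n / 2)
--     heapsize = n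
--     while i >= 0:
--         A = maxheapify(A, i, heapsize)
--         i = i - 1
--     return A
-- ===== SOURCE B (Python) =====
-- def buildmaxheap(A):
--     heapsize = len(A) - 1
--     for i in range((len(A) - 1) // 2, -1, -1):
--         j = i
--         while True:
--             L = 2 * j + 1
--             R = 2 * j + 2
--             largest = j
--             if L < heapsize and A[L] > A[j]:
--                 largest = L
--             if R < heapsize and A[R] > A[largest]:
--                 largest = R
--             if largest == j:
--                 break
--             A[j], A[largest] = A[largest], A[j]
--             j = largest
--     return A
-- ===== Notes on version B (the rewrite author's own statement) =====
-- stated objective: alternative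
-- what changed: Replaces the recursive maxheapify helper called from a hand-rolled while-countdown with a self-contained for-loop over range((len(A)-1)//2, -1, -1) whose body is an iterative sift-down (a while loop tracking the current index), so there is no helper function and no recursion; the reproduced heapsize = len(A)-1 bound and loop start follow A's own convention.
import Mathlib
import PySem

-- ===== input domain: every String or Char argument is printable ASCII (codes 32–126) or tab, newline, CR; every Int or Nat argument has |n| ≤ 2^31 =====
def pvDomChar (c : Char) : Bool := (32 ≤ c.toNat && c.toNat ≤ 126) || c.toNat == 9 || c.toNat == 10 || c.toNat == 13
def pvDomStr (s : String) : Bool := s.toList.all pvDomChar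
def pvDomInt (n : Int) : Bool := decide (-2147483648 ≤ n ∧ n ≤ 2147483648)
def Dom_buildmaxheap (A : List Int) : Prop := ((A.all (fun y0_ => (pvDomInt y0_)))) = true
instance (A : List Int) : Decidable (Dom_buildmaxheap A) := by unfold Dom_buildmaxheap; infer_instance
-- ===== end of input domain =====

-- B replaces A's recursive maxheapify helper plus hand-rolled while-countdown by a single
-- for-loop over range((len(A)-1)//2, -1, -1) with an iterative sift-down body (alternative
-- decomposition, same cost). Both Pythons mutate A in place; the claim is about the return value.

-- ===== PORT A =====
-- literal port of maxheapify; fuel only guards totality (the real recursion depth is < len(A)+1)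
def maxheapifyA (fuel : Nat) (A : List Int) (i heapsize : Int) : List Int :=
  match fuel with
  | 0 => A
  | fuel + 1 =>
    let L := i * 2 + 1
    let R := i * 2 + 2
    let largest := i
    let largest := if L < heapsize ∧ PySem.List.pyGetD A L 0 > PySem.List.pyGetD A i 0 then L else largest
    let largest := if R < heapsize ∧ PySem.List.pyGetD A R 0 > PySem.List.pyGetD A largest 0 then R else largest
    if largest ≠ i then
      let temp := PySem.List.pyGetD A i 0
      let A := PySem.List.pySetD A i (PySem.List.pyGetD A largest 0)
      let A := PySem.List.pySetD A largest temp
      maxheapifyA fuel A largest heapsize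
    else A

-- the 'while i >= 0' loop of buildmaxheap; fuel = number of remaining iterations
def whileA (fuel : Nat) (A : List Int) (i heapsize : Int) : List Int :=
  match fuel with
  | 0 => A
  | fuel + 1 =>
    if i ≥ 0 then whileA fuel (maxheapifyA (A.length + 1) A i heapsize) (i - 1) heapsize
    else A

def buildmaxheap (A : List Int) : List Int :=
  let n : Int := (A.length : Int) - 1
  let i : Int := PySem.Int.truncdiv n 2
  let heapsize := n
  whileA (i + 1).toNat A i heapsize

-- ===== PORT B =====
-- the inner 'while True' sift-down of Source B; fuel only guards totality
def siftB (fuel : Nat) (A : List Int) (j heapsize : Int) : List Int :=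
  match fuel with
  | 0 => A
  | fuel + 1 =>
    let L := 2 * j + 1
    let R := 2 * j + 2
    let largest := j
    let largest := if L < heapsize ∧ PySem.List.pyGetD A L 0 > PySem.List.pyGetD A j 0 then L else largest
    let largest := if R < heapsize ∧ PySem.List.pyGetD A R 0 > PySem.List.pyGetD A largest 0 then R else largest
    if largest = j then A
    else
      let x := PySem.List.pyGetD A largest 0
      let y := PySem.List.pyGetD A j 0
      siftB fuel (PySem.List.pySetD (PySem.List.pySetD A j x) largest y) largest heapsize

def buildmaxheap_alt (A : List Int) : List Int :=
  let heapsize : Int := (A.length : Int) - 1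
  (PySem.List.pyRange (PySem.Int.floordiv ((A.length : Int) - 1) 2) (-1) (-1)).foldl
    (fun acc i => siftB (acc.length + 1) acc i heapsize) A

-- ===== PRECONDITION & SPEC =====
def Spec_buildmaxheap (A : List Int) (out : List Int) : Prop := out = buildmaxheap_alt A
instance (A : List Int) (out : List Int) : Decidable (Spec_buildmaxheap A out) := by unfold Spec_buildmaxheap; infer_instance

-- ===== CLAIM (what is proved, stated in full; the proofs are below) =====
def Claim_equal_buildmaxheap : Prop := ∀ (A : List Int), Dom_buildmaxheap A → Spec_buildmaxheap A (buildmaxheap A)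

-- ===== LEMMAS AND PROOFS =====

-- the recursive maxheapify and the iterative sift-down compute the same list
theorem sift_eq (fuel : Nat) : ∀ (A : List Int) (i heapsize : Int),
    maxheapifyA fuel A i heapsize = siftB fuel A i heapsize := by
  induction fuel with
  | zero => intro A i hs; rfl
  | succ f ih =>
    intro A i hs
    simp only [maxheapifyA, siftB, mul_comm i 2]
    split_ifs with h1 h2 <;> first | rfl | exact ih _ _ _ | omega

theorem pyRange_desc_cons (k : Nat) :
    PySem.List.pyRange ((k : Nat) : Int) (-1) (-1) = ((k : Nat) : Int) :: PySem.List.pyRange (((k : Nat) : Int) - 1) (-1) (-1) := by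
  unfold PySem.List.pyRange
  have h1 : ((-1 : Int) < (k : Int)) := by omega
  cases k with
  | zero => decide
  | succ m =>
    have h2 : ((-1 : Int) < (m : Int)) := by omega
    have e1 : (((m+1 : Nat) : Int) - (-1) + -(-1) - 1) / -(-1) = ((m : Nat) : Int) + 2 := by push_cast; ring_nf; omega
    have e2 : (((m+1 : Nat) : Int) - 1 - (-1) + -(-1) - 1) / -(-1) = ((m : Nat) : Int) + 1 := by push_cast; ring_nf; omega
    simp only [show ¬((-1:Int) = 0) from by decide, show ¬(0 < (-1:Int)) from by decide,
      if_pos h1, if_false]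
    rw [if_pos (by push_cast; omega), e1, e2]
    have : (((m : Nat) : Int) + 2).toNat = m + 2 := by omega
    rw [this]
    have : (((m : Nat) : Int) + 1).toNat = m + 1 := by omega
    rw [this]
    rw [List.range_succ_eq_map, List.map_cons, List.map_map]
    congr 1
    apply List.map_congr_left; intro x hx
    simp only [Function.comp_apply]
    push_cast; ring

theorem loop_eq (k : Nat) (hs : Int) : ∀ (A : List Int),
    whileA (k + 1) A (k : Int) hs =
      (PySem.List.pyRange (k : Int) (-1) (-1)).foldl
        (fun acc i => siftB (acc.length + 1) acc i hs) A := by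
  induction k with
  | zero =>
    intro A
    rw [pyRange_desc_cons 0]
    simp only [Nat.cast_zero, zero_sub, show PySem.List.pyRange (-1) (-1) (-1) = [] from by decide]
    simp only [whileA, ge_iff_le, le_refl, if_pos, List.foldl_cons, List.foldl_nil]
    exact sift_eq _ _ _ _
  | succ m ih =>
    intro A
    rw [pyRange_desc_cons (m+1)]
    have hc : ((m + 1 : Nat) : Int) - 1 = (m : Int) := by push_cast; ring
    rw [List.foldl_cons, hc]
    rw [show whileA (m + 1 + 1) A ((m+1 : Nat) : Int) hs
        = whileA (m + 1) (maxheapifyA (A.length + 1) A ((m+1 : Nat) : Int) hs) (((m+1 : Nat) : Int) - 1) hs from by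
      simp only [whileA]; rw [if_pos (by positivity)]]
    rw [hc, sift_eq]
    exact ih _

theorem final (A : List Int) : buildmaxheap A = buildmaxheap_alt A := by
  match A with
  | [] => decide
  | a :: t =>
    unfold buildmaxheap buildmaxheap_alt
    simp only [List.length_cons]
    have hn : ((t.length + 1 : Nat) : Int) - 1 = (t.length : Int) := by push_cast; ring
    rw [hn]
    have htd : PySem.Int.truncdiv (t.length : Int) 2 = ((t.length / 2 : Nat) : Int) := by
      show Int.tdiv _ _ = _
      rw [Int.tdiv_eq_ediv_of_nonneg (by positivity)]
      exact Nat.ToInt.div_congr rfl rfl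
    have hfd : PySem.Int.floordiv (t.length : Int) 2 = ((t.length / 2 : Nat) : Int) := by
      exact_mod_cast PySem.Int.floordiv_natCast t.length 2
    rw [htd, hfd]
    have hf : (((t.length / 2 : Nat) : Int) + 1).toNat = t.length / 2 + 1 := by omega
    rw [hf]
    exact loop_eq (t.length / 2) _ _

-- ===== VERDICT (by name: the statement is the Claim_ definition above) =====
theorem buildmaxheap_spec : Claim_equal_buildmaxheap := by
  intro A _
  unfold Spec_buildmaxheap
  exact final A
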